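-- pv_equiv track=rewrite | github.com/mnurzia/re | tools/unicode_data.py | find_best_pair
-- ===== SOURCE A (Python) =====
-- def squish_factor(leads, trails, arrangement):
--     fac = 0
--     for i in range(1,len(arrangement)):
--         if trails[arrangement[i]][0] == leads[arrangement[i]][0]:
--             fac += min(trails[arrangement[i-1]][1], leads[arrangement[i]][1])
--     return fac
--
-- def find_best_pair(leads, trails):
--     maxsq = -1
--     maxsqidx = None
--     for i, t in enumerate(trails):
--         for j, l in enumerate(leads):
--             if j == i:
--                 continue
--             sq = squish_factor(leads, trails, (i, j))
--             if sq > maxsq: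
--                 maxsq = sq
--                 maxsqidx = (i, j)
--     return maxsqidx
-- ===== SOURCE B (Python) =====
-- def find_best_pair(leads, trails):
--     if not trails:
--         return None
--     # per-column ingredients: does column j match, and its lead value
--     cols = [(trails[j][0] == l0, l1) for j, (l0, l1) in enumerate(leads)]
--     # one pass: top-two (value, index) of lead values over matching columns,
--     # and the number of non-matching columns
--     t1 = t2 = None
--     nfalse = 0
--     for j, (c, lv) in enumerate(cols):
--         if c:
--             if t1 is None or lv > t1[0]:
--                 t1, t2 = (lv, j), t1
--             elif t2 is None or lv > t2[0]:
--                 t2 = (lv, j)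
--         else:
--             nfalse += 1
--     # per row i, the row maximum in O(1):
--     #   max_{j != i} (min(ti, lv_j) if c_j else 0)
--     # = max(min(ti, best matching lead value excluding column i), 0 if a
--     #   non-matching column != i exists)
--     best, besti = -1, None
--     for i, (_, ti) in enumerate(trails):
--         top = t2 if (t1 is not None and t1[1] == i) else t1
--         cand = None if top is None else min(ti, top[0])
--         if nfalse - (1 if i < len(cols) and not cols[i][0] else 0) > 0:
--             cand = 0 if cand is None else max(cand, 0)
--         if cand is not None and cand > best:
--             best, besti = cand, i
--     if besti is None:
--         return None
--     # recover the earliest column attaining the maximum in the winning row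
--     ti = trails[besti][1]
--     for j, (c, lv) in enumerate(cols):
--         if j != besti and (min(ti, lv) if c else 0) == best:
--             return (besti, j)
-- ===== Notes on version B (the rewrite author's own statement) =====
-- stated objective: faster
-- what changed: B replaces the exhaustive scan over all (i,j) pairs by a closed form: one pass computes the top-two matching lead values (with indices) and the count of non-matching columns, so each row's maximum is max(min(ti, best matching lead value excluding column i), 0 if a non-matching column != i exists) in O(1); one final scan of the winning row recovers the earliest column attaining it.
import Mathlib
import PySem

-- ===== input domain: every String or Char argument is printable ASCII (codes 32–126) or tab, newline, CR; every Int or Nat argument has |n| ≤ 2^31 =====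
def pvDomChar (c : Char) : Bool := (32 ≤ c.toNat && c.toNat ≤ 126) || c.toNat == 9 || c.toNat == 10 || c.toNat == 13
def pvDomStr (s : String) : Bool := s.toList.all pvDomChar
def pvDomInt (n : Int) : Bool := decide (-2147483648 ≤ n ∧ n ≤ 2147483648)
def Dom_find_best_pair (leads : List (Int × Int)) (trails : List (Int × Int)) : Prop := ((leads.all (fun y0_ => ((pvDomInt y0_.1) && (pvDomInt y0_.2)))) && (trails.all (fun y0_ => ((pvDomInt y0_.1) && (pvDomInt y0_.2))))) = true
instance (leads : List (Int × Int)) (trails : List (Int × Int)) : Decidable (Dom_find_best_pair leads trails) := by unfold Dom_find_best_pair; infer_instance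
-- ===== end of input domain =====

-- B replaces A's scan over all (i,j) pairs by a closed form: one pass computes the top-two
-- matching lead values and the count of non-matching columns, each row's maximum then costs O(1),
-- and one final scan of the winning row recovers the earliest column attaining it (objective: faster).

-- ===== PORT A =====
-- squish_factor is only ever called with the 2-tuple (i, j), so arrangement : Int × Int;
-- range(1, len(arrangement)) = [1], arrangement[1] = arr.2, arrangement[0] = arr.1.
-- Indexing may raise IndexError: Option result, none = raise.
def squish_factor (leads : List (Int × Int)) (trails : List (Int × Int)) (arr : Int × Int) : Option Int :=
  match PySem.List.pyGet? trails arr.2, PySem.List.pyGet? leads arr.2 with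
  | some tj, some lj =>
      if tj.1 == lj.1 then
        (PySem.List.pyGet? trails arr.1).map (fun tp => 0 + min tp.2 lj.2)
      else some 0
  | _, _ => none

-- A's nested loops: Option-valued state threads the possible IndexError from squish_factor
def find_best_pair (leads : List (Int × Int)) (trails : List (Int × Int)) : Option (Int × Int) :=
  let r := (PySem.List.enumerate trails 0).foldl
    (fun (st : Option (Int × Option (Int × Int))) (it : Int × (Int × Int)) =>
      match st with
      | none => none
      | some (maxsq, maxsqidx) =>
        (PySem.List.enumerate leads 0).foldl
          (fun (st2 : Option (Int × Option (Int × Int))) (jt : Int × (Int × Int)) =>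
            match st2 with
            | none => none
            | some (m, idx) =>
              if jt.1 == it.1 then some (m, idx)
              else
                match squish_factor leads trails (it.1, jt.1) with
                | none => none
                | some sq => if sq > m then some (sq, some (it.1, jt.1)) else some (m, idx))
          (some (maxsq, maxsqidx)))
    (some (-1, none))
  match r with
  | some (_, idx) => idx
  | none => none

-- ===== PORT B =====
def find_best_pair_alt (leads : List (Int × Int)) (trails : List (Int × Int)) : Option (Int × Int) :=
  if trails.isEmpty then none
  else
    match (PySem.List.enumerate leads 0).mapM
        (fun jl => (PySem.List.pyGet? trails jl.1).map (fun t => (t.1 == jl.2.1, jl.2.2))) with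
    | none => none
    | some cols =>
      -- one pass: top-two (value, index) of lead values over matching columns + #non-matching
      let s1 := (PySem.List.enumerate cols 0).foldl
        (fun (st : Option (Int × Int) × Option (Int × Int) × Int) (jc : Int × (Bool × Int)) =>
          if jc.2.1 then
            match st.1 with
            | none => (some (jc.2.2, jc.1), st.1, st.2.2)
            | some p =>
              if jc.2.2 > p.1 then (some (jc.2.2, jc.1), st.1, st.2.2)
              else
                match st.2.1 with
                | none => (st.1, some (jc.2.2, jc.1), st.2.2)
                | some q => if jc.2.2 > q.1 then (st.1, some (jc.2.2, jc.1), st.2.2) else st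
          else (st.1, st.2.1, st.2.2 + 1))
        (none, none, (0 : Int))
      -- per row i the row maximum in O(1)
      let s2 := (PySem.List.enumerate trails 0).foldl
        (fun (st : Int × Option Int) (it : Int × (Int × Int)) =>
          let top := match s1.1 with
            | some p => if p.2 == it.1 then s1.2.1 else s1.1
            | none => s1.1
          let cand0 := top.map (fun p => min it.2.2 p.1)
          let cand := if s1.2.2 - (if it.1 < (cols.length : Int) ∧ (PySem.List.pyGetD cols it.1 (false, 0)).1 = false then (1 : Int) else 0) > 0
            then some (match cand0 with | none => (0 : Int) | some v => max v 0)
            else cand0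
          match cand with
          | none => st
          | some c => if c > st.1 then (c, some it.1) else st)
        ((-1 : Int), (none : Option Int))
      match s2.2 with
      | none => none
      | some i0 =>
        match PySem.List.pyGet? trails i0 with
        | none => none  -- unreachable: i0 is an index produced by enumerate(trails)
        | some tb =>
          -- earliest column attaining the maximum in the winning row
          (PySem.List.enumerate cols 0).foldl
            (fun (r : Option (Int × Int)) (jc : Int × (Bool × Int)) =>
              match r with
              | some _ => r
              | none =>
                if jc.1 ≠ i0 ∧ (if jc.2.1 then min tb.2 jc.2.2 else 0) = s2.1
                then some (i0, jc.1) else none)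
            none

-- ===== PRECONDITION & SPEC =====
-- Pre_ excludes exactly the inputs on which Python A raises IndexError (leads longer than a
-- nonempty trails: the inner loop evaluates trails[j] for j = len(trails)); B raises there too.
def Pre_find_best_pair (leads : List (Int × Int)) (trails : List (Int × Int)) : Prop :=
  trails = [] ∨ leads.length ≤ trails.length
instance (leads : List (Int × Int)) (trails : List (Int × Int)) : Decidable (Pre_find_best_pair leads trails) := by unfold Pre_find_best_pair; infer_instance

def pvWitness_find_best_pair : (List (Int × Int)) × (List (Int × Int)) :=
  ([(1, 2)], [(1, 3), (0, 0)])

def Spec_find_best_pair (leads : List (Int × Int)) (trails : List (Int × Int)) (out : Option (Int × Int)) : Prop := out = find_best_pair_alt leads trails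
instance (leads : List (Int × Int)) (trails : List (Int × Int)) (out : Option (Int × Int)) : Decidable (Spec_find_best_pair leads trails out) := by unfold Spec_find_best_pair; infer_instance

-- ===== CLAIM (what is proved, stated in full; the proofs are below) =====
def Claim_equal_find_best_pair : Prop := ∀ (leads : List (Int × Int)) (trails : List (Int × Int)), Dom_find_best_pair leads trails → Pre_find_best_pair leads trails → Spec_find_best_pair leads trails (find_best_pair leads trails)

-- ===== LEMMAS AND PROOFS =====

def pvVal (t : Int) (c : Bool × Int) : Int := if c.1 then min t c.2 else 0

-- A's inner (row) loop, keeping (row max so far, first argmax)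
def pvRowB (i ti : Int) (l : List (Int × (Bool × Int))) (r : Option (Int × Int)) : Option (Int × Int) :=
  l.foldl
    (fun r jc =>
      if jc.1 == i then r
      else
        let sq := if jc.2.1 then min ti jc.2.2 else 0
        match r with
        | none => some (sq, jc.1)
        | some rv => if sq > rv.1 then some (sq, jc.1) else r)
    r

lemma pvRowB_cons (i ti : Int) (x : Int × (Bool × Int)) (l : List (Int × (Bool × Int))) (r : Option (Int × Int)) :
    pvRowB i ti (x :: l) r = pvRowB i ti l
      (if x.1 == i then r
       else
        let sq := if x.2.1 then min ti x.2.2 else 0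
        match r with
        | none => some (sq, x.1)
        | some rv => if sq > rv.1 then some (sq, x.1) else r) := rfl

lemma pvRowB_mono (i ti : Int) : ∀ (l : List (Int × (Bool × Int))) (p : Int × Int),
    ∃ q, pvRowB i ti l (some p) = some q ∧ (q = p ∨ p.1 < q.1) := by
  intro l
  induction l with
  | nil => intro p; exact ⟨p, rfl, Or.inl rfl⟩
  | cons x l ih =>
    intro p
    rw [pvRowB_cons]
    by_cases hx : (x.1 == i) = true
    · rw [if_pos hx]; exact ih p
    · rw [if_neg hx]
      set sq := if x.2.1 then min ti x.2.2 else 0 with hsq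
      by_cases hs : sq > p.1
      · simp only [hs, if_pos]
        obtain ⟨q, hq, hq'⟩ := ih (sq, x.1)
        refine ⟨q, hq, Or.inr ?_⟩
        rcases hq' with h | h
        · rw [h]; exact hs
        · simp only [] at h; omega
      · simp only [hs, if_neg, not_false_iff]
        exact ih p

def pvRowA (i : Int) (sqf : Int → Option Int) (l : List (Int × (Int × Int)))
    (st : Option (Int × Option (Int × Int))) : Option (Int × Option (Int × Int)) :=
  l.foldl
    (fun st2 jt =>
      match st2 with
      | none => none
      | some (m, idx) =>
        if jt.1 == i then some (m, idx)
        else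
          match sqf jt.1 with
          | none => none
          | some sq => if sq > m then some (sq, some (i, jt.1)) else some (m, idx))
    st

lemma pvRowA_cons (i : Int) (sqf : Int → Option Int) (p : Int × (Int × Int)) (l : List (Int × (Int × Int)))
    (st : Option (Int × Option (Int × Int))) :
    pvRowA i sqf (p :: l) st = pvRowA i sqf l
      (match st with
      | none => none
      | some (m, idx) =>
        if p.1 == i then some (m, idx)
        else
          match sqf p.1 with
          | none => none
          | some sq => if sq > m then some (sq, some (i, p.1)) else some (m, idx)) := rfl

lemma pvRow_main (i ti : Int) (sqf : Int → Option Int) (F : Int × (Int × Int) → Bool × Int) :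
    ∀ (l : List (Int × (Int × Int))),
    (∀ p ∈ l, sqf p.1 = some (pvVal ti (F p))) →
    ∀ (m : Int) (idx : Option (Int × Int)) (r : Option (Int × Int)),
    (r = none ∨ ∃ rv rj, r = some (rv, rj) ∧ rv ≤ m) →
    pvRowA i sqf l (some (m, idx)) =
      some (match pvRowB i ti (l.map fun p => (p.1, F p)) r with
            | none => (m, idx)
            | some q => if q.1 > m then (q.1, some (i, q.2)) else (m, idx)) := by
  intro l
  induction l with
  | nil =>
    intro _ m idx r hr
    rcases hr with h | ⟨rv, rj, h, hle⟩
    · simp [pvRowA, pvRowB, h]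
    · simp [pvRowA, pvRowB, h, show ¬ rv > m by omega]
  | cons p l ih =>
    intro hsq m idx r hr
    have hp := hsq p (List.mem_cons_self ..)
    have hl : ∀ q ∈ l, sqf q.1 = some (pvVal ti (F q)) :=
      fun q hq => hsq q (List.mem_cons_of_mem _ hq)
    have push : ∀ (m' : Int) (idx' : Option (Int × Int)) (sq j : Int),
        pvRowA i sqf l (if sq > m' then some (sq, some (i, j)) else some (m', idx')) =
        some (match pvRowB i ti (l.map fun p => (p.1, F p)) (some (sq, j)) with
              | none => (m', idx')
              | some q => if q.1 > m' then (q.1, some (i, q.2)) else (m', idx')) := by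
      intro m' idx' sq j
      by_cases hgt : sq > m'
      · rw [if_pos hgt, ih hl sq (some (i, j)) (some (sq, j)) (Or.inr ⟨sq, j, rfl, le_refl _⟩)]
        obtain ⟨q, hq, hq'⟩ := pvRowB_mono i ti (l.map fun p => (p.1, F p)) (sq, j)
        rw [hq]
        dsimp only
        rcases hq' with h | h
        · rw [h]; dsimp only; rw [if_neg (by omega : ¬ sq > sq), if_pos hgt]
        · have h1 : q.1 > sq := h
          rw [if_pos h1, if_pos (by omega : q.1 > m')]
      · rw [if_neg hgt]
        exact ih hl m' idx' (some (sq, j)) (Or.inr ⟨sq, j, rfl, by omega⟩)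
    rw [pvRowA_cons, List.map_cons, pvRowB_cons]
    dsimp only
    by_cases hpi : (p.1 == i) = true
    · rw [if_pos hpi, if_pos hpi]
      exact ih hl m idx r hr
    · rw [if_neg hpi, if_neg hpi, hp]
      dsimp only
      have hfold : (if (F p).1 = true then min ti (F p).2 else 0) = pvVal ti (F p) := rfl
      rw [hfold]
      cases r with
      | none =>
        dsimp only
        exact push m idx (pvVal ti (F p)) p.1
      | some rv =>
        have hle : rv.1 ≤ m := by
          rcases hr with h | ⟨rv', rj', heq, hle'⟩
          · exact absurd h (by simp)
          · injection heq with heq; rw [heq]; exact hle'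
        dsimp only
        by_cases hg2 : pvVal ti (F p) > rv.1
        · rw [if_pos hg2]
          exact push m idx (pvVal ti (F p)) p.1
        · rw [if_neg hg2]
          rw [if_neg (by omega : ¬ pvVal ti (F p) > m)]
          exact ih hl m idx (some rv) (Or.inr ⟨rv.1, rv.2, by simp, hle⟩)

def pvF (trails : List (Int × Int)) (p : Int × (Int × Int)) : Bool × Int :=
  ((PySem.List.pyGetD trails p.1 (0, 0)).1 == p.2.1, p.2.2)

lemma pvMem_enumerate {α : Type} : ∀ (xs : List α) (s : Nat) (p : Int × α),
    p ∈ PySem.List.enumerate xs (s : Int) →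
    ∃ k : Nat, k < xs.length ∧ p.1 = (s : Int) + (k : Int) ∧ xs[k]? = some p.2 := by
  intro xs
  induction xs with
  | nil => intro s p h; simp [PySem.List.enumerate_nil] at h
  | cons x xs ih =>
    intro s p h
    rw [PySem.List.enumerate_cons] at h
    rcases List.mem_cons.mp h with h | h
    · exact ⟨0, by simp, by simp [h], by simp [h]⟩
    · have h' : p ∈ PySem.List.enumerate xs ((s + 1 : Nat) : Int) := by
        have hc : ((s : Int) + 1) = ((s + 1 : Nat) : Int) := by push_cast; ring
        rwa [hc] at h
      obtain ⟨k, hk, hk1, hk2⟩ := ih (s + 1) p h'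
      exact ⟨k + 1, by simpa using hk, by push_cast at hk1 ⊢; omega, by simpa using hk2⟩

lemma pvCands_spec (T : List (Int × Int)) : ∀ (L : List (Int × Int)) (s : Nat),
    L.length + s ≤ T.length →
    (PySem.List.enumerate L (s : Int)).mapM
        (fun jl => (PySem.List.pyGet? T jl.1).map (fun t => (t.1 == jl.2.1, jl.2.2)))
      = some (List.zipWith (fun l t => (t.1 == l.1, l.2)) L (T.drop s)) := by
  intro L
  induction L with
  | nil => intro s _; simp [PySem.List.enumerate_nil]
  | cons x L ih =>
    intro s hs
    have hsT : s < T.length := by simp at hs; omega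
    rw [PySem.List.enumerate_cons, List.mapM_cons]
    have h1 : (PySem.List.pyGet? T ((s : Int))).map (fun t => (t.1 == x.1, x.2))
        = some (T[s].1 == x.1, x.2) := by
      rw [PySem.List.pyGet?_natCast, List.getElem?_eq_getElem hsT]; rfl
    have hcast : ((s : Int) + 1) = ((s + 1 : Nat) : Int) := by push_cast; ring
    dsimp only
    rw [h1, hcast, ih (s + 1) (by simp at hs ⊢; omega)]
    rw [List.drop_eq_getElem_cons hsT]
    rfl

lemma pvEnum_cands (T : List (Int × Int)) : ∀ (L : List (Int × Int)) (s : Nat),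
    L.length + s ≤ T.length →
    PySem.List.enumerate (List.zipWith (fun l t => (t.1 == l.1, l.2)) L (T.drop s)) (s : Int)
      = (PySem.List.enumerate L (s : Int)).map (fun p => (p.1, pvF T p)) := by
  intro L
  induction L with
  | nil => intro s _; simp [PySem.List.enumerate_nil]
  | cons x L ih =>
    intro s hs
    have hsT : s < T.length := by simp at hs; omega
    rw [List.drop_eq_getElem_cons hsT]
    rw [show List.zipWith (fun l t => (t.1 == l.1, l.2)) (x :: L) (T[s] :: T.drop (s + 1))
          = (T[s].1 == x.1, x.2) :: List.zipWith (fun l t => (t.1 == l.1, l.2)) L (T.drop (s + 1)) from rfl]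
    rw [PySem.List.enumerate_cons, PySem.List.enumerate_cons, List.map_cons]
    have hcast : ((s : Int) + 1) = ((s + 1 : Nat) : Int) := by push_cast; ring
    rw [hcast, ih (s + 1) (by simp at hs ⊢; omega)]
    have hF : pvF T ((s : Int), x) = (T[s].1 == x.1, x.2) := by
      simp [pvF, PySem.List.pyGetD_natCast, List.getD_eq_getElem?_getD, List.getElem?_eq_getElem hsT]
    rw [hF]

-- ---------- B stage 1: top-two invariant ----------

def pvStep1 (st : Option (Int × Int) × Option (Int × Int) × Int) (jc : Int × (Bool × Int)) :
    Option (Int × Int) × Option (Int × Int) × Int :=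
  if jc.2.1 then
    match st.1 with
    | none => (some (jc.2.2, jc.1), st.1, st.2.2)
    | some p =>
      if jc.2.2 > p.1 then (some (jc.2.2, jc.1), st.1, st.2.2)
      else
        match st.2.1 with
        | none => (st.1, some (jc.2.2, jc.1), st.2.2)
        | some q => if jc.2.2 > q.1 then (st.1, some (jc.2.2, jc.1), st.2.2) else st
  else (st.1, st.2.1, st.2.2 + 1)

def pvInv (P : List (Int × (Bool × Int))) (st : Option (Int × Int) × Option (Int × Int) × Int) : Prop :=
  st.2.2 = (((P.filter (fun jc => !jc.2.1)).length : Int)) ∧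
  ((st.1 = none ∧ st.2.1 = none ∧ ∀ jc ∈ P, jc.2.1 = false) ∨
   (∃ p, st.1 = some p ∧ (p.2, (true, p.1)) ∈ P ∧ (∀ jc ∈ P, jc.2.1 = true → jc.2.2 ≤ p.1) ∧
     ((st.2.1 = none ∧ ∀ jc ∈ P, jc.2.1 = true → jc.1 = p.2) ∨
      (∃ q, st.2.1 = some q ∧ q.2 ≠ p.2 ∧ (q.2, (true, q.1)) ∈ P ∧
        (∀ jc ∈ P, jc.2.1 = true → jc.1 ≠ p.2 → jc.2.2 ≤ q.1)))))

lemma pvInv_step (P : List (Int × (Bool × Int))) (st : Option (Int × Int) × Option (Int × Int) × Int)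
    (x : Int × (Bool × Int)) (hinv : pvInv P st) (hfresh : ∀ a ∈ P, a.1 ≠ x.1) :
    pvInv (P ++ [x]) (pvStep1 st x) := by
  obtain ⟨hnf, hrest⟩ := hinv
  have hmem : ∀ (y : Int × (Bool × Int)), y ∈ P ++ [x] ↔ y ∈ P ∨ y = x := by
    intro y; simp [List.mem_append]
  cases hc : x.2.1 with
  | false =>
    have hstep : pvStep1 st x = (st.1, st.2.1, st.2.2 + 1) := by
      unfold pvStep1; rw [hc]; simp
    rw [hstep]
    constructor
    · show st.2.2 + 1 = _
      rw [hnf, List.filter_append]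
      simp [hc]
    · rcases hrest with ⟨h1, h2, hall⟩ | ⟨p, hp1, hpmem, hub, hsec⟩
      · refine Or.inl ⟨h1, h2, ?_⟩
        intro jc hjc
        rcases (hmem jc).mp hjc with h | h
        · exact hall jc h
        · rw [h]; exact hc
      · refine Or.inr ⟨p, hp1, (hmem _).mpr (Or.inl hpmem), ?_, ?_⟩
        · intro jc hjc ht
          rcases (hmem jc).mp hjc with h | h
          · exact hub jc h ht
          · rw [h, hc] at ht; exact absurd ht (by simp)
        · rcases hsec with ⟨h2, hidx⟩ | ⟨q, hq1, hqne, hqmem, hqub⟩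
          · refine Or.inl ⟨h2, ?_⟩
            intro jc hjc ht
            rcases (hmem jc).mp hjc with h | h
            · exact hidx jc h ht
            · rw [h, hc] at ht; exact absurd ht (by simp)
          · refine Or.inr ⟨q, hq1, hqne, (hmem _).mpr (Or.inl hqmem), ?_⟩
            intro jc hjc ht hne
            rcases (hmem jc).mp hjc with h | h
            · exact hqub jc h ht hne
            · rw [h, hc] at ht; exact absurd ht (by simp)
  | true =>
    have hnf2 : (((P ++ [x]).filter (fun jc => !jc.2.1)).length : Int) = st.2.2 := by
      rw [hnf, List.filter_append]
      simp [hc]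
    rcases hrest with ⟨h1, h2, hall⟩ | ⟨p, hp1, hpmem, hub, hsec⟩
    · -- no matching column yet: x becomes t1
      have hstep : pvStep1 st x = (some (x.2.2, x.1), st.1, st.2.2) := by
        unfold pvStep1; rw [hc, h1]; simp
      rw [hstep]
      refine ⟨hnf2.symm, Or.inr ⟨(x.2.2, x.1), rfl, ?_, ?_, Or.inl ⟨h1, ?_⟩⟩⟩
      · apply (hmem _).mpr; right; rw [← hc]
      · intro jc hjc ht
        rcases (hmem jc).mp hjc with h | h
        · rw [hall jc h] at ht; exact absurd ht (by simp)
        · rw [h]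
      · intro jc hjc ht
        rcases (hmem jc).mp hjc with h | h
        · rw [hall jc h] at ht; exact absurd ht (by simp)
        · rw [h]
    · by_cases hgt : x.2.2 > p.1
      · -- x becomes new t1, old t1 demoted to t2
        have hstep : pvStep1 st x = (some (x.2.2, x.1), st.1, st.2.2) := by
          unfold pvStep1; rw [hc, hp1]; simp [hgt]
        rw [hstep, hp1]
        refine ⟨hnf2.symm, Or.inr ⟨(x.2.2, x.1), rfl, (hmem _).mpr (Or.inr (by rw [← hc])), ?_,
          Or.inr ⟨p, rfl, ?_, (hmem _).mpr (Or.inl hpmem), ?_⟩⟩⟩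
        · intro jc hjc ht
          rcases (hmem jc).mp hjc with h | h
          · have := hub jc h ht; omega
          · rw [h]
        · exact hfresh _ hpmem
        · intro jc hjc ht hne
          rcases (hmem jc).mp hjc with h | h
          · exact hub jc h ht
          · exact absurd (by rw [h]) hne
      · rcases hsec with ⟨h2, hidx⟩ | ⟨q, hq1, hqne, hqmem, hqub⟩
        · -- x becomes t2
          have hstep : pvStep1 st x = (st.1, some (x.2.2, x.1), st.2.2) := by
            unfold pvStep1; rw [hc, hp1, h2]; simp [hgt]
          rw [hstep, hp1]
          refine ⟨hnf2.symm, Or.inr ⟨p, rfl, (hmem _).mpr (Or.inl hpmem), ?_,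
            Or.inr ⟨(x.2.2, x.1), rfl, ?_, (hmem _).mpr (Or.inr (by rw [← hc])), ?_⟩⟩⟩
          · intro jc hjc ht
            rcases (hmem jc).mp hjc with h | h
            · exact hub jc h ht
            · rw [h]; omega
          · exact fun h => hfresh _ hpmem h.symm
          · intro jc hjc ht hne
            rcases (hmem jc).mp hjc with h | h
            · exact absurd (hidx jc h ht) hne
            · rw [h]
        · by_cases hgt2 : x.2.2 > q.1
          · -- x becomes new t2
            have hstep : pvStep1 st x = (st.1, some (x.2.2, x.1), st.2.2) := by
              unfold pvStep1; rw [hc, hp1, hq1]; simp [hgt, hgt2]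
            rw [hstep, hp1]
            refine ⟨hnf2.symm, Or.inr ⟨p, rfl, (hmem _).mpr (Or.inl hpmem), ?_,
              Or.inr ⟨(x.2.2, x.1), rfl, ?_, (hmem _).mpr (Or.inr (by rw [← hc])), ?_⟩⟩⟩
            · intro jc hjc ht
              rcases (hmem jc).mp hjc with h | h
              · exact hub jc h ht
              · rw [h]; omega
            · exact fun h => hfresh _ hpmem h.symm
            · intro jc hjc ht hne
              rcases (hmem jc).mp hjc with h | h
              · have := hqub jc h ht hne; omega
              · rw [h]
          · -- state unchanged
            have hstep : pvStep1 st x = st := by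
              unfold pvStep1; rw [hc, hp1, hq1]; simp [hgt, hgt2]
            rw [hstep]
            refine ⟨hnf2.symm, Or.inr ⟨p, hp1, (hmem _).mpr (Or.inl hpmem), ?_,
              Or.inr ⟨q, hq1, hqne, (hmem _).mpr (Or.inl hqmem), ?_⟩⟩⟩
            · intro jc hjc ht
              rcases (hmem jc).mp hjc with h | h
              · exact hub jc h ht
              · rw [h]; omega
            · intro jc hjc ht hne
              rcases (hmem jc).mp hjc with h | h
              · exact hqub jc h ht hne
              · rw [h]; omega

lemma pvInv_fold : ∀ (l P : List (Int × (Bool × Int))) (st : Option (Int × Int) × Option (Int × Int) × Int),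
    pvInv P st → (∀ a ∈ P, ∀ b ∈ l, a.1 ≠ b.1) → l.Pairwise (fun a b => a.1 ≠ b.1) →
    pvInv (P ++ l) (l.foldl pvStep1 st) := by
  intro l
  induction l with
  | nil => intro P st h _ _; simpa using h
  | cons x l ih =>
    intro P st hinv hfresh hpw
    rw [List.pairwise_cons] at hpw
    have h1 : pvInv (P ++ [x]) (pvStep1 st x) :=
      pvInv_step P st x hinv (fun a ha => hfresh a ha x (List.mem_cons_self ..))
    have h2 : ∀ a ∈ P ++ [x], ∀ b ∈ l, a.1 ≠ b.1 := by
      intro a ha b hb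
      rcases List.mem_append.mp ha with h | h
      · exact hfresh a h b (List.mem_cons_of_mem _ hb)
      · rw [List.mem_singleton.mp h]; exact hpw.1 b hb
    have := ih (P ++ [x]) (pvStep1 st x) h1 h2 hpw.2
    rw [List.foldl_cons]
    have h3 : P ++ [x] ++ l = P ++ x :: l := by simp
    rwa [h3] at this


-- ---------- row maximum characterization ----------

def pvRMax (i t : Int) (l : List (Int × (Bool × Int))) (ro : Option Int) : Option Int :=
  l.foldl
    (fun ro jc =>
      if jc.1 == i then ro
      else
        match ro with
        | none => some (pvVal t jc.2)
        | some v => some (max v (pvVal t jc.2)))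
    ro

lemma pvRMax_cons (i t : Int) (x : Int × (Bool × Int)) (l : List (Int × (Bool × Int))) (ro : Option Int) :
    pvRMax i t (x :: l) ro = pvRMax i t l
      (if x.1 == i then ro
       else
        match ro with
        | none => some (pvVal t x.2)
        | some v => some (max v (pvVal t x.2))) := rfl

def pvFMax (i t : Int) (l : List (Int × (Bool × Int))) (v0 : Int) : Int :=
  l.foldl (fun v jc => if jc.1 == i then v else max v (pvVal t jc.2)) v0

lemma pvFMax_cons (i t : Int) (x : Int × (Bool × Int)) (l : List (Int × (Bool × Int))) (v0 : Int) :
    pvFMax i t (x :: l) v0 = pvFMax i t l (if x.1 == i then v0 else max v0 (pvVal t x.2)) := rfl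

lemma pvRMax_acc (i t : Int) : ∀ (l : List (Int × (Bool × Int))) (v0 : Int),
    pvRMax i t l (some v0) = some (pvFMax i t l v0) := by
  intro l
  induction l with
  | nil => intro v0; rfl
  | cons x l ih =>
    intro v0
    rw [pvRMax_cons, pvFMax_cons]
    by_cases hx : (x.1 == i) = true
    · rw [if_pos hx, if_pos hx]; exact ih v0
    · rw [if_neg hx, if_neg hx]; exact ih _

lemma pvFMax_ge (i t : Int) : ∀ (l : List (Int × (Bool × Int))) (v0 : Int), v0 ≤ pvFMax i t l v0 := by
  intro l
  induction l with
  | nil => intro v0; exact le_refl _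
  | cons x l ih =>
    intro v0
    rw [pvFMax_cons]
    by_cases hx : (x.1 == i) = true
    · rw [if_pos hx]; exact ih v0
    · rw [if_neg hx]
      exact le_trans (le_max_left _ _) (ih _)

lemma pvFMax_ub (i t : Int) : ∀ (l : List (Int × (Bool × Int))) (v0 : Int),
    ∀ jc ∈ l, jc.1 ≠ i → pvVal t jc.2 ≤ pvFMax i t l v0 := by
  intro l
  induction l with
  | nil => intro v0 jc h; exact absurd h (by simp)
  | cons x l ih =>
    intro v0 jc hjc hne
    rw [pvFMax_cons]
    rcases List.mem_cons.mp hjc with h | h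
    · subst h
      have hx : (jc.1 == i) = false := by simp [hne]
      rw [hx]
      simp only [Bool.false_eq_true, if_false]
      exact le_trans (le_max_right _ _) (pvFMax_ge i t l _)
    · by_cases hx : (x.1 == i) = true
      · rw [if_pos hx]; exact ih v0 jc h hne
      · rw [if_neg hx]; exact ih _ jc h hne

lemma pvFMax_attain (i t : Int) : ∀ (l : List (Int × (Bool × Int))) (v0 : Int),
    pvFMax i t l v0 = v0 ∨ ∃ jc ∈ l, jc.1 ≠ i ∧ pvVal t jc.2 = pvFMax i t l v0 := by
  intro l
  induction l with
  | nil => intro v0; exact Or.inl rfl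
  | cons x l ih =>
    intro v0
    rw [pvFMax_cons]
    by_cases hx : (x.1 == i) = true
    · rw [if_pos hx]
      rcases ih v0 with h | ⟨jc, hjc, hne, hv⟩
      · exact Or.inl h
      · exact Or.inr ⟨jc, List.mem_cons_of_mem _ hjc, hne, hv⟩
    · rw [if_neg hx]
      rcases ih (max v0 (pvVal t x.2)) with h | ⟨jc, hjc, hne, hv⟩
      · rw [h]
        rcases max_choice v0 (pvVal t x.2) with h2 | h2
        · exact Or.inl h2
        · exact Or.inr ⟨x, List.mem_cons_self .., by simpa using hx, h2.symm⟩
      · exact Or.inr ⟨jc, List.mem_cons_of_mem _ hjc, hne, hv⟩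

lemma pvRMax_char (i t : Int) : ∀ (l : List (Int × (Bool × Int))),
    (pvRMax i t l none = none ∧ ∀ jc ∈ l, jc.1 = i) ∨
    (∃ v, pvRMax i t l none = some v ∧ (∃ jc ∈ l, jc.1 ≠ i ∧ pvVal t jc.2 = v) ∧
      (∀ jc ∈ l, jc.1 ≠ i → pvVal t jc.2 ≤ v)) := by
  intro l
  induction l with
  | nil => exact Or.inl ⟨rfl, by simp⟩
  | cons x l ih =>
    by_cases hx : (x.1 == i) = true
    · have hred : pvRMax i t (x :: l) none = pvRMax i t l none := by
        rw [pvRMax_cons, if_pos hx]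
      rcases ih with ⟨h1, h2⟩ | ⟨v, hv, ⟨jc, hjc, hjc2⟩, hu⟩
      · refine Or.inl ⟨by rw [hred]; exact h1, ?_⟩
        intro jc hjc
        rcases List.mem_cons.mp hjc with h | h
        · subst h; simpa using hx
        · exact h2 jc h
      · refine Or.inr ⟨v, by rw [hred]; exact hv, ⟨jc, List.mem_cons_of_mem _ hjc, hjc2⟩, ?_⟩
        intro jc hjc hne
        rcases List.mem_cons.mp hjc with h | h
        · subst h; exact absurd (by simpa using hx) hne
        · exact hu jc h hne
    · have hred : pvRMax i t (x :: l) none = some (pvFMax i t l (pvVal t x.2)) := by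
        rw [pvRMax_cons, if_neg hx]
        exact pvRMax_acc i t l _
      refine Or.inr ⟨pvFMax i t l (pvVal t x.2), hred, ?_, ?_⟩
      · rcases pvFMax_attain i t l (pvVal t x.2) with h | ⟨jc, hjc, hne, hv⟩
        · exact ⟨x, List.mem_cons_self .., by simpa using hx, h.symm⟩
        · exact ⟨jc, List.mem_cons_of_mem _ hjc, hne, hv⟩
      · intro jc hjc hne
        rcases List.mem_cons.mp hjc with h | h
        · subst h; exact pvFMax_ge i t l _
        · exact pvFMax_ub i t l _ jc h hne

lemma pvRowB_fst (i t : Int) : ∀ (l : List (Int × (Bool × Int))) (r : Option (Int × Int)),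
    (pvRowB i t l r).map (fun x => x.1) = pvRMax i t l (r.map (fun x => x.1)) := by
  intro l
  induction l with
  | nil => intro r; rfl
  | cons x l ih =>
    intro r
    rw [pvRowB_cons, pvRMax_cons, ih]
    congr 1
    by_cases hx : (x.1 == i) = true
    · rw [if_pos hx, if_pos hx]
    · rw [if_neg hx, if_neg hx]
      cases r with
      | none => rfl
      | some rv =>
        dsimp only [Option.map_some]
        have hval : (if x.2.1 then min t x.2.2 else 0) = pvVal t x.2 := rfl
        by_cases hgt : (if x.2.1 then min t x.2.2 else 0) > rv.1
        · rw [if_pos hgt]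
          dsimp only [Option.map_some]
          rw [hval] at hgt ⊢
          congr 1
          omega
        · rw [if_neg hgt]
          dsimp only [Option.map_some]
          rw [hval] at hgt
          congr 1
          omega


-- ---------- the non-matching-column count ----------

lemma pvCountPos (l : List (Int × (Bool × Int))) (p : Int × (Bool × Int) → Bool) :
    ((0 : Int) < ((l.filter p).length : Int)) ↔ ∃ jc ∈ l, p jc = true := by
  rw [Int.natCast_pos, List.length_pos_iff]
  constructor
  · intro h
    rcases List.exists_mem_of_ne_nil _ h with ⟨x, hx⟩
    exact ⟨x, (List.mem_filter.mp hx).1, (List.mem_filter.mp hx).2⟩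
  · rintro ⟨jc, h1, h2⟩ hnil
    exact absurd (List.filter_eq_nil_iff.mp hnil jc h1) (by simp [h2])

lemma pvFalseCount : ∀ (cols : List (Bool × Int)) (s : Nat) (i : Int), (s : Int) ≤ i →
    ((((PySem.List.enumerate cols (s : Int)).filter (fun jc => !jc.2.1 && jc.1 != i)).length : Int))
      = (((PySem.List.enumerate cols (s : Int)).filter (fun jc => !jc.2.1)).length : Int)
        - (if i < (s : Int) + cols.length ∧ (PySem.List.pyGetD cols (i - (s : Int)) (false, 0)).1 = false then 1 else 0) := by
  intro cols
  induction cols with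
  | nil =>
    intro s i hs
    rw [PySem.List.enumerate_nil]
    simp only [List.filter_nil, List.length_nil, Nat.cast_zero]
    rw [if_neg (by simp; omega)]
    ring
  | cons c rest ih =>
    intro s i hs
    rw [PySem.List.enumerate_cons]
    have hcast : ((s : Int) + 1) = ((s + 1 : Nat) : Int) := by push_cast; ring
    by_cases hi : i = (s : Int)
    · subst hi
      have hget : (PySem.List.pyGetD (c :: rest) ((s : Int) - (s : Int)) (false, 0)) = c := by
        rw [show (s : Int) - (s : Int) = ((0 : Nat) : Int) by omega, PySem.List.pyGetD_natCast]
        rfl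
      have hcond : ((s : Int) < (s : Int) + ((c :: rest).length : Int) ∧
          (PySem.List.pyGetD (c :: rest) ((s : Int) - (s : Int)) (false, 0)).1 = false) ↔ (c.1 = false) := by
        rw [hget]
        simp only [List.length_cons]
        constructor
        · exact fun h => h.2
        · intro h; exact ⟨by push_cast; omega, h⟩
      have htail : ((PySem.List.enumerate rest ((s : Int) + 1)).filter (fun jc => !jc.2.1 && jc.1 != (s : Int)))
          = ((PySem.List.enumerate rest ((s : Int) + 1)).filter (fun jc => !jc.2.1)) := by
        apply List.filter_congr
        intro jc hjc
        rw [hcast] at hjc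
        obtain ⟨k, _, hk1, _⟩ := pvMem_enumerate rest (s + 1) jc hjc
        have hne : jc.1 ≠ (s : Int) := by push_cast at hk1; omega
        simp [hne]
      rw [List.filter_cons, List.filter_cons]
      rw [if_neg (by simp)]
      rw [htail]
      by_cases hcb : c.1 = true
      · rw [if_neg (by simp [hcb]), if_neg (by rw [hcond]; simp [hcb])]
        omega
      · have hcb' : c.1 = false := by simpa using hcb
        rw [if_pos (by simp [hcb']), if_pos (hcond.mpr hcb')]
        simp only [List.length_cons]
        push_cast
        ring
    · have hs' : ((s + 1 : Nat) : Int) ≤ i := by push_cast; omega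
      have hindval : (if i < (s : Int) + ((c :: rest).length : Int) ∧ (PySem.List.pyGetD (c :: rest) (i - (s : Int)) (false, 0)).1 = false then (1:Int) else 0)
          = (if i < ((s + 1 : Nat) : Int) + (rest.length : Int) ∧ (PySem.List.pyGetD rest (i - ((s + 1 : Nat) : Int)) (false, 0)).1 = false then (1:Int) else 0) := by
        have hlen : (s : Int) + (((c :: rest).length : Nat) : Int) = ((s + 1 : Nat) : Int) + (rest.length : Int) := by
          simp only [List.length_cons]; push_cast; ring
        obtain ⟨k, hk⟩ : ∃ k : Nat, i - (s : Int) = (k : Int) + 1 := ⟨(i - s - 1).toNat, by omega⟩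
        have h1 : (PySem.List.pyGetD (c :: rest) (i - (s : Int)) (false, 0)) = (PySem.List.pyGetD rest (i - ((s + 1 : Nat) : Int)) (false, 0)) := by
          rw [hk, show ((k : Int) + 1) = ((k + 1 : Nat) : Int) by push_cast; ring,
            show i - ((s + 1 : Nat) : Int) = (k : Int) by push_cast; omega]
          rw [PySem.List.pyGetD_natCast, PySem.List.pyGetD_natCast]
          rfl
        rw [hlen, h1]
      have hne : ((((s : Int), c) : Int × (Bool × Int)).1 != i) = true := by simp; omega
      rw [List.filter_cons, List.filter_cons, hindval]
      have IH := ih (s + 1) i hs'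
      rw [← hcast] at IH hindval
      by_cases hcb : c.1 = true
      · rw [if_neg (by simp [hcb]), if_neg (by simp [hcb])]
        push_cast at IH ⊢
        rw [IH]
      · have hcb' : c.1 = false := by simpa using hcb
        rw [if_pos (by simp [hcb', hne]), if_pos (by simp [hcb'])]
        simp only [List.length_cons]
        push_cast at IH ⊢
        rw [IH]
        ring

-- ---------- the O(1) row maximum of B ----------

def pvCand (t1 t2 : Option (Int × Int)) (nf : Int) (cols : List (Bool × Int)) (i t : Int) : Option Int :=
  let top := match t1 with
    | some p => if p.2 == i then t2 else t1
    | none => t1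
  let cand0 := top.map (fun p => min t p.1)
  if nf - (if i < (cols.length : Int) ∧ (PySem.List.pyGetD cols i (false, 0)).1 = false then (1 : Int) else 0) > 0
  then some (match cand0 with | none => (0 : Int) | some v => max v 0)
  else cand0

lemma pvRMax_eq_of (i t : Int) (l : List (Int × (Bool × Int))) (c : Option Int)
    (hnone : c = none → ∀ jc ∈ l, jc.1 = i)
    (hsome : ∀ v, c = some v → (∃ jc ∈ l, jc.1 ≠ i ∧ pvVal t jc.2 = v) ∧ (∀ jc ∈ l, jc.1 ≠ i → pvVal t jc.2 ≤ v)) :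
    pvRMax i t l none = c := by
  rcases pvRMax_char i t l with ⟨h1, h2⟩ | ⟨v, hv, ⟨jc, hjc, hne, hval⟩, hub⟩
  · cases c with
    | none => exact h1
    | some w =>
      obtain ⟨⟨jc, hjc, hne, _⟩, _⟩ := hsome w rfl
      exact absurd (h2 jc hjc) hne
  · cases c with
    | none => exact absurd (hnone rfl jc hjc) hne
    | some w =>
      obtain ⟨⟨jc2, hjc2, hne2, hval2⟩, hub2⟩ := hsome w rfl
      rw [hv]
      congr 1
      have ha : v ≤ w := hval ▸ hub2 jc hjc hne
      have hb : w ≤ v := hval2 ▸ hub jc2 hjc2 hne2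
      omega

lemma pvCand_eq (cols : List (Bool × Int)) (t1 t2 : Option (Int × Int)) (nf : Int)
    (hinv : pvInv (PySem.List.enumerate cols 0) (t1, t2, nf)) (i t : Int) (hi : 0 ≤ i) :
    pvRMax i t (PySem.List.enumerate cols 0) none = pvCand t1 t2 nf cols i t := by
  have hnf : nf = (((PySem.List.enumerate cols 0).filter (fun jc => !jc.2.1)).length : Int) := hinv.1
  have hrest := hinv.2
  have hzero : (nf - (if i < (cols.length : Int) ∧ (PySem.List.pyGetD cols i (false, 0)).1 = false then (1 : Int) else 0) > 0)
      ↔ ∃ jc ∈ PySem.List.enumerate cols 0, jc.2.1 = false ∧ jc.1 ≠ i := by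
    have hfc := pvFalseCount cols 0 i (by exact_mod_cast hi)
    simp only [Nat.cast_zero, zero_add, sub_zero] at hfc
    have hcp := pvCountPos (PySem.List.enumerate cols 0) (fun jc => !jc.2.1 && jc.1 != i)
    constructor
    · intro h
      have : (0:Int) < (((PySem.List.enumerate cols 0).filter (fun jc => !jc.2.1 && jc.1 != i)).length : Int) := by
        rw [hfc]
        show (0:Int) < _ - _
        rw [hnf] at h
        exact h
      obtain ⟨jc, hjc, hp⟩ := hcp.mp this
      refine ⟨jc, hjc, ?_, ?_⟩
      · have := (Bool.and_eq_true _ _).mp hp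
        simpa using this.1
      · have := (Bool.and_eq_true _ _).mp hp
        simpa using this.2
    · rintro ⟨jc, hjc, hf, hne⟩
      have : (0:Int) < (((PySem.List.enumerate cols 0).filter (fun jc => !jc.2.1 && jc.1 != i)).length : Int) :=
        hcp.mpr ⟨jc, hjc, by simp [hf, hne]⟩
      rw [hfc] at this
      rw [hnf]
      exact this
  rcases hrest with ⟨h1, h2, hall⟩ | ⟨p, hp1, hpmem, hub, hsec⟩
  · -- no matching column at all
    have ht1 : t1 = none := h1
    have hc : pvCand t1 t2 nf cols i t =
        if nf - (if i < (cols.length : Int) ∧ (PySem.List.pyGetD cols i (false, 0)).1 = false then (1 : Int) else 0) > 0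
        then some 0 else none := by
      unfold pvCand; rw [ht1]
      rfl
    rw [hc]
    by_cases hz : nf - (if i < (cols.length : Int) ∧ (PySem.List.pyGetD cols i (false, 0)).1 = false then (1 : Int) else 0) > 0
    · rw [if_pos hz]
      apply pvRMax_eq_of
      · intro h; exact absurd h (by simp)
      · intro v hv
        injection hv with hv
        subst hv
        constructor
        · obtain ⟨jc, hjc, hf, hne2⟩ := hzero.mp hz
          exact ⟨jc, hjc, hne2, by simp [pvVal, hf]⟩
        · intro jc hjc _
          simp [pvVal, hall jc hjc]
    · rw [if_neg hz]
      apply pvRMax_eq_of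
      · intro _ jc hjc
        by_contra hne2
        exact hz (hzero.mpr ⟨jc, hjc, hall jc hjc, hne2⟩)
      · intro v hv; exact absurd hv (by simp)
  · have ht1 : t1 = some p := hp1
    by_cases hpi : p.2 = i
    · -- the best matching column is excluded: use the second best
      rcases hsec with ⟨h2, hidx⟩ | ⟨q, hq1, hqne, hqmem, hqub⟩
      · -- no second best: only row i itself matches
        have ht2 : t2 = none := h2
        have hc : pvCand t1 t2 nf cols i t =
            if nf - (if i < (cols.length : Int) ∧ (PySem.List.pyGetD cols i (false, 0)).1 = false then (1 : Int) else 0) > 0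
            then some 0 else none := by
          unfold pvCand; rw [ht1, ht2]; simp [hpi]
        rw [hc]
        by_cases hz : nf - (if i < (cols.length : Int) ∧ (PySem.List.pyGetD cols i (false, 0)).1 = false then (1 : Int) else 0) > 0
        · rw [if_pos hz]
          apply pvRMax_eq_of
          · intro h; exact absurd h (by simp)
          · intro v hv
            injection hv with hv
            subst hv
            constructor
            · obtain ⟨jc, hjc, hf, hne2⟩ := hzero.mp hz
              exact ⟨jc, hjc, hne2, by simp [pvVal, hf]⟩
            · intro jc hjc hne2
              cases hb : jc.2.1
              · simp [pvVal, hb]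
              · exact absurd (by rw [hidx jc hjc hb]; exact hpi) hne2
        · rw [if_neg hz]
          apply pvRMax_eq_of
          · intro _ jc hjc
            by_contra hne2
            cases hb : jc.2.1
            · exact hz (hzero.mpr ⟨jc, hjc, hb, hne2⟩)
            · exact hne2 (by rw [hidx jc hjc hb]; exact hpi)
          · intro v hv; exact absurd hv (by simp)
      · -- second best exists
        have ht2 : t2 = some q := hq1
        have hqi : q.2 ≠ i := by rw [← hpi]; exact hqne
        have hc : pvCand t1 t2 nf cols i t =
            if nf - (if i < (cols.length : Int) ∧ (PySem.List.pyGetD cols i (false, 0)).1 = false then (1 : Int) else 0) > 0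
            then some (max (min t q.1) 0) else some (min t q.1) := by
          unfold pvCand; rw [ht1, ht2]; simp [hpi]
        rw [hc]
        by_cases hz : nf - (if i < (cols.length : Int) ∧ (PySem.List.pyGetD cols i (false, 0)).1 = false then (1 : Int) else 0) > 0
        · rw [if_pos hz]
          apply pvRMax_eq_of
          · intro h; exact absurd h (by simp)
          · intro v hv
            injection hv with hv
            subst hv
            constructor
            · by_cases h0 : 0 ≤ min t q.1
              · exact ⟨(q.2, (true, q.1)), hqmem, hqi, by simp [pvVal]; omega⟩
              · obtain ⟨jc, hjc, hf, hne2⟩ := hzero.mp hz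
                refine ⟨jc, hjc, hne2, ?_⟩
                simp [pvVal, hf]
                omega
            · intro jc hjc hne2
              cases hb : jc.2.1
              · simp [pvVal, hb]
              · have := hqub jc hjc hb (by rw [hpi]; exact hne2)
                simp [pvVal, hb]
                omega
        · rw [if_neg hz]
          apply pvRMax_eq_of
          · intro h; exact absurd h (by simp)
          · intro v hv
            injection hv with hv
            subst hv
            constructor
            · exact ⟨(q.2, (true, q.1)), hqmem, hqi, by simp [pvVal]⟩
            · intro jc hjc hne2
              cases hb : jc.2.1
              · exact absurd (hzero.mpr ⟨jc, hjc, hb, hne2⟩) hz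
              · have := hqub jc hjc hb (by rw [hpi]; exact hne2)
                simp [pvVal, hb]
                omega
    · -- the best matching column is a valid partner
      have hc : pvCand t1 t2 nf cols i t =
          if nf - (if i < (cols.length : Int) ∧ (PySem.List.pyGetD cols i (false, 0)).1 = false then (1 : Int) else 0) > 0
          then some (max (min t p.1) 0) else some (min t p.1) := by
        unfold pvCand; rw [ht1]; simp [hpi]
      rw [hc]
      by_cases hz : nf - (if i < (cols.length : Int) ∧ (PySem.List.pyGetD cols i (false, 0)).1 = false then (1 : Int) else 0) > 0
      · rw [if_pos hz]
        apply pvRMax_eq_of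
        · intro h; exact absurd h (by simp)
        · intro v hv
          injection hv with hv
          subst hv
          constructor
          · by_cases h0 : 0 ≤ min t p.1
            · exact ⟨(p.2, (true, p.1)), hpmem, hpi, by simp [pvVal]; omega⟩
            · obtain ⟨jc, hjc, hf, hne2⟩ := hzero.mp hz
              refine ⟨jc, hjc, hne2, ?_⟩
              simp [pvVal, hf]
              omega
          · intro jc hjc hne2
            cases hb : jc.2.1
            · simp [pvVal, hb]
            · have := hub jc hjc hb
              simp [pvVal, hb]
              omega
      · rw [if_neg hz]
        apply pvRMax_eq_of
        · intro h; exact absurd h (by simp)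
        · intro v hv
          injection hv with hv
          subst hv
          constructor
          · exact ⟨(p.2, (true, p.1)), hpmem, hpi, by simp [pvVal]⟩
          · intro jc hjc hne2
            cases hb : jc.2.1
            · exact absurd (hzero.mpr ⟨jc, hjc, hb, hne2⟩) hz
            · have := hub jc hjc hb
              simp [pvVal, hb]
              omega



-- ---------- recovering the earliest attaining column ----------

def pvScanStep (i0 tb best : Int) (r : Option (Int × Int)) (jc : Int × (Bool × Int)) : Option (Int × Int) :=
  match r with
  | some _ => r
  | none =>
    if jc.1 ≠ i0 ∧ (if jc.2.1 then min tb jc.2.2 else 0) = best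
    then some (i0, jc.1) else none

def pvScan (i0 tb best : Int) (l : List (Int × (Bool × Int))) : Option (Int × Int) :=
  l.foldl (pvScanStep i0 tb best) none

lemma pvScan_stop (i0 tb best : Int) : ∀ (l : List (Int × (Bool × Int))) (y : Int × Int),
    l.foldl (pvScanStep i0 tb best) (some y) = some y := by
  intro l
  induction l with
  | nil => intro y; rfl
  | cons x l ih => intro y; rw [List.foldl_cons]; exact ih y

lemma pvScan_cons (i0 tb best : Int) (x : Int × (Bool × Int)) (l : List (Int × (Bool × Int))) :
    pvScan i0 tb best (x :: l) =
      if x.1 ≠ i0 ∧ (if x.2.1 then min tb x.2.2 else 0) = best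
      then some (i0, x.1) else pvScan i0 tb best l := by
  unfold pvScan
  rw [List.foldl_cons]
  by_cases h : x.1 ≠ i0 ∧ (if x.2.1 then min tb x.2.2 else 0) = best
  · rw [if_pos h]
    show List.foldl _ (pvScanStep i0 tb best none x) l = _
    unfold pvScanStep
    rw [if_pos h]
    exact pvScan_stop i0 tb best l _
  · rw [if_neg h]
    show List.foldl _ (pvScanStep i0 tb best none x) l = _
    unfold pvScanStep
    rw [if_neg h]

lemma pvRowB_scan (i t : Int) : ∀ (l : List (Int × (Bool × Int))) (v j0 R jR : Int),
    pvRowB i t l (some (v, j0)) = some (R, jR) →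
    (R = v ∧ jR = j0) ∨ (v < R ∧ pvScan i t R l = some (i, jR)) := by
  intro l
  induction l with
  | nil =>
    intro v j0 R jR h
    injection h with h
    exact Or.inl ⟨(congrArg Prod.fst h).symm, (congrArg Prod.snd h).symm⟩
  | cons x l ih =>
    intro v j0 R jR h
    rw [pvRowB_cons] at h
    by_cases hx : (x.1 == i) = true
    · rw [if_pos hx] at h
      rcases ih v j0 R jR h with h' | ⟨h1, h2⟩
      · exact Or.inl h'
      · refine Or.inr ⟨h1, ?_⟩
        rw [pvScan_cons, if_neg (by simp at hx; simp [hx])]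
        exact h2
    · rw [if_neg hx] at h
      dsimp only at h
      by_cases hgt : (if x.2.1 then min t x.2.2 else 0) > v
      · rw [if_pos hgt] at h
        rcases ih _ _ _ _ h with ⟨h1, h2⟩ | ⟨h1, h2⟩
        · refine Or.inr ⟨by omega, ?_⟩
          rw [pvScan_cons, if_pos ⟨by simpa using hx, by omega⟩, h2]
        · refine Or.inr ⟨by omega, ?_⟩
          rw [pvScan_cons, if_neg (by push Not; intro _; omega)]
          exact h2
      · rw [if_neg hgt] at h
        rcases ih v j0 R jR h with h' | ⟨h1, h2⟩
        · exact Or.inl h'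
        · refine Or.inr ⟨h1, ?_⟩
          rw [pvScan_cons, if_neg (by push Not; intro _; omega)]
          exact h2

lemma pvRowB_scan_none (i t : Int) : ∀ (l : List (Int × (Bool × Int))) (R jR : Int),
    pvRowB i t l none = some (R, jR) → pvScan i t R l = some (i, jR) := by
  intro l
  induction l with
  | nil => intro R jR h; exact absurd h (by simp [pvRowB])
  | cons x l ih =>
    intro R jR h
    rw [pvRowB_cons] at h
    by_cases hx : (x.1 == i) = true
    · rw [if_pos hx] at h
      rw [pvScan_cons, if_neg (by simp at hx; simp [hx])]
      exact ih R jR h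
    · rw [if_neg hx] at h
      dsimp only at h
      rcases pvRowB_scan i t l _ _ R jR h with ⟨h1, h2⟩ | ⟨h1, h2⟩
      · rw [pvScan_cons, if_pos ⟨by simpa using hx, by omega⟩, h2]
      · rw [pvScan_cons, if_neg (by push Not; intro _; omega)]
        exact h2

-- ---------- relating the two outer loops ----------

def pvStepA (C : List (Int × (Bool × Int))) (st : Int × Option (Int × Int)) (it : Int × (Int × Int)) :
    Int × Option (Int × Int) :=
  match pvRowB it.1 it.2.2 C none with
  | none => st
  | some q => if q.1 > st.1 then (q.1, some (it.1, q.2)) else st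

def pvStepB (t1 t2 : Option (Int × Int)) (nf : Int) (cols : List (Bool × Int))
    (st : Int × Option Int) (it : Int × (Int × Int)) : Int × Option Int :=
  match pvCand t1 t2 nf cols it.1 it.2.2 with
  | none => st
  | some c => if c > st.1 then (c, some it.1) else st

def pvRel (trails : List (Int × Int)) (cols : List (Bool × Int))
    (stA : Int × Option (Int × Int)) (stB : Int × Option Int) : Prop :=
  stA.1 = stB.1 ∧
  ((stA.2 = none ∧ stB.2 = none) ∨
   (∃ ij i0 tb, stA.2 = some ij ∧ stB.2 = some i0 ∧ ij.1 = i0 ∧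
      PySem.List.pyGet? trails i0 = some tb ∧
      pvScan i0 tb.2 stA.1 (PySem.List.enumerate cols 0) = some (i0, ij.2)))

lemma pvStage2_rel (trails : List (Int × Int)) (cols : List (Bool × Int))
    (t1 t2 : Option (Int × Int)) (nf : Int)
    (hinv : pvInv (PySem.List.enumerate cols 0) (t1, t2, nf)) :
    ∀ (l : List (Int × (Int × Int))),
    (∀ it ∈ l, 0 ≤ it.1 ∧ PySem.List.pyGet? trails it.1 = some it.2) →
    ∀ (stA : Int × Option (Int × Int)) (stB : Int × Option Int), pvRel trails cols stA stB →
    pvRel trails cols (l.foldl (pvStepA (PySem.List.enumerate cols 0)) stA)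
      (l.foldl (pvStepB t1 t2 nf cols) stB) := by
  intro l
  induction l with
  | nil => exact fun _ _ _ h => h
  | cons x l ih =>
    intro hl stA stB hrel
    rw [List.foldl_cons, List.foldl_cons]
    apply ih (fun it h => hl it (List.mem_cons_of_mem _ h))
    obtain ⟨hx0, hxget⟩ := hl x (List.mem_cons_self ..)
    obtain ⟨hfst, hsnd⟩ := hrel
    have hcv : (pvRowB x.1 x.2.2 (PySem.List.enumerate cols 0) none).map (fun y => y.1)
        = pvCand t1 t2 nf cols x.1 x.2.2 := by
      rw [pvRowB_fst]
      exact pvCand_eq cols t1 t2 nf hinv x.1 x.2.2 hx0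
    unfold pvStepA pvStepB
    cases hrb : pvRowB x.1 x.2.2 (PySem.List.enumerate cols 0) none with
    | none =>
      rw [hrb] at hcv
      simp only [Option.map_none] at hcv
      rw [← hcv]
      exact ⟨hfst, hsnd⟩
    | some q =>
      rw [hrb] at hcv
      simp only [Option.map_some] at hcv
      rw [← hcv]
      dsimp only
      by_cases hgt : q.1 > stA.1
      · rw [if_pos hgt, if_pos (by rw [← hfst]; exact hgt)]
        refine ⟨rfl, Or.inr ⟨(x.1, q.2), x.1, x.2, rfl, rfl, rfl, hxget, ?_⟩⟩
        exact pvRowB_scan_none x.1 x.2.2 _ q.1 q.2 (by rw [hrb])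
      · rw [if_neg hgt, if_neg (by rw [← hfst]; exact hgt)]
        exact ⟨hfst, hsnd⟩

-- ---------- reducing A's outer loop ----------

lemma pvOuterA (leads trails : List (Int × Int)) :
    ∀ (lT : List (Int × (Int × Int))),
    (∀ p ∈ lT, ∀ q ∈ PySem.List.enumerate leads 0,
        squish_factor leads trails (p.1, q.1) = some (pvVal p.2.2 (pvF trails q))) →
    ∀ (b : Int × Option (Int × Int)),
    lT.foldl
      (fun (st : Option (Int × Option (Int × Int))) (it : Int × (Int × Int)) =>
        match st with
        | none => none
        | some (maxsq, maxsqidx) =>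
          pvRowA it.1 (fun j => squish_factor leads trails (it.1, j))
            (PySem.List.enumerate leads 0) (some (maxsq, maxsqidx)))
      (some b)
    = some (lT.foldl (pvStepA ((PySem.List.enumerate leads 0).map (fun p => (p.1, pvF trails p)))) b) := by
  intro lT
  induction lT with
  | nil => intro _ b; rfl
  | cons p lT ih =>
    intro hT b
    have hp := hT p (List.mem_cons_self ..)
    have hT' : ∀ p' ∈ lT, ∀ q ∈ PySem.List.enumerate leads 0,
        squish_factor leads trails (p'.1, q.1) = some (pvVal p'.2.2 (pvF trails q)) :=
      fun p' h => hT p' (List.mem_cons_of_mem _ h)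
    rw [List.foldl_cons, List.foldl_cons]
    dsimp only
    rw [show (some b : Option (Int × Option (Int × Int))) = some (b.1, b.2) from by rw [Prod.mk.eta]]
    rw [pvRow_main p.1 p.2.2 (fun j => squish_factor leads trails (p.1, j)) (pvF trails)
      (PySem.List.enumerate leads 0) hp b.1 b.2 none (Or.inl rfl)]
    have hstep : pvStepA ((PySem.List.enumerate leads 0).map (fun p => (p.1, pvF trails p))) b p
        = match pvRowB p.1 p.2.2 ((PySem.List.enumerate leads 0).map (fun p => (p.1, pvF trails p))) none with
          | none => b
          | some q => if q.1 > b.1 then (q.1, some (p.1, q.2)) else b := rfl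
    rw [hstep]
    cases hR : pvRowB p.1 p.2.2 ((PySem.List.enumerate leads 0).map (fun q => (q.1, pvF trails q))) none with
    | none =>
      dsimp only
      rw [Prod.mk.eta]
      exact ih hT' b
    | some q =>
      dsimp only
      by_cases hq : q.1 > b.1
      · rw [if_pos hq]
        exact ih hT' (q.1, some (p.1, q.2))
      · rw [if_neg hq, Prod.mk.eta]
        exact ih hT' b


lemma pvFinal (trails : List (Int × Int)) (cols : List (Bool × Int))
    (fA : Int × Option (Int × Int)) (fB : Int × Option Int)
    (hrel : pvRel trails cols fA fB) :
    fA.2 = (match fB.2 with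
            | none => none
            | some i0 =>
              match PySem.List.pyGet? trails i0 with
              | none => none
              | some tb => pvScan i0 tb.2 fB.1 (PySem.List.enumerate cols 0)) := by
  obtain ⟨hfst, hsnd⟩ := hrel
  rcases hsnd with ⟨h1, h2⟩ | ⟨ij, i0, tb, hA2, hB2, hij, htb, hscan⟩
  · rw [h1, h2]
  · rw [hA2, hB2]
    dsimp only
    rw [htb]
    dsimp only
    rw [← hfst, hscan, ← hij]

lemma pvMain (leads trails : List (Int × Int)) (hm : leads.length ≤ trails.length)
    (ht : trails ≠ []) : find_best_pair leads trails = find_best_pair_alt leads trails := by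
  unfold find_best_pair find_best_pair_alt
  have hne : trails.isEmpty = false := by simpa [List.isEmpty_iff] using ht
  rw [hne]
  simp only [Bool.false_eq_true, if_false]
  have hc0 := pvCands_spec trails leads 0 (by omega)
  simp only [Nat.cast_zero, List.drop_zero] at hc0
  rw [hc0]
  set Z := List.zipWith (fun l t => (t.1 == l.1, l.2)) leads trails with hZdef
  -- the per-pair squish factor is pvVal of the per-column data
  have hT : ∀ p ∈ PySem.List.enumerate trails 0,
      ∀ q ∈ PySem.List.enumerate leads 0,
      squish_factor leads trails (p.1, q.1) = some (pvVal p.2.2 (pvF trails q)) := by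
    intro p hpmem q hqmem
    obtain ⟨ki, hki, hki1, hki2⟩ := pvMem_enumerate trails 0 p (by simpa using hpmem)
    obtain ⟨kj, hkj, hkj1, hkj2⟩ := pvMem_enumerate leads 0 q (by simpa using hqmem)
    simp only [Nat.cast_zero, zero_add] at hki1 hkj1
    have hkjT : kj < trails.length := by omega
    have hjt : PySem.List.pyGet? trails q.1 = some trails[kj] := by
      rw [hkj1, PySem.List.pyGet?_natCast, List.getElem?_eq_getElem hkjT]
    have hjl : PySem.List.pyGet? leads q.1 = some leads[kj] := by
      rw [hkj1, PySem.List.pyGet?_natCast, List.getElem?_eq_getElem hkj]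
    have hit : PySem.List.pyGet? trails p.1 = some trails[ki] := by
      rw [hki1, PySem.List.pyGet?_natCast, List.getElem?_eq_getElem hki]
    have hq2 : q.2 = leads[kj] := by
      rw [List.getElem?_eq_getElem hkj] at hkj2; injection hkj2 with h; exact h.symm
    have hti : p.2 = trails[ki] := by
      rw [List.getElem?_eq_getElem hki] at hki2; injection hki2 with h; exact h.symm
    have hFq : pvF trails q = (trails[kj].1 == leads[kj].1, leads[kj].2) := by
      simp [pvF, hkj1, hq2, List.getD_eq_getElem?_getD, List.getElem?_eq_getElem hkjT]
    unfold squish_factor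
    rw [hjt, hjl, hFq]
    dsimp only
    by_cases hcond : (trails[kj].1 == leads[kj].1) = true
    · rw [if_pos hcond, hit]
      simp only [Option.map_some, Option.some.injEq]
      simp [pvVal, hcond, hti]
    · rw [if_neg hcond]
      simp [pvVal, hcond]
  have hOut := pvOuterA leads trails (PySem.List.enumerate trails 0) hT
    ((-1 : Int), (none : Option (Int × Int)))
  show (match (PySem.List.enumerate trails 0).foldl
      (fun (st : Option (Int × Option (Int × Int))) (it : Int × (Int × Int)) =>
        match st with
        | none => none
        | some (maxsq, maxsqidx) =>
          pvRowA it.1 (fun j => squish_factor leads trails (it.1, j))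
            (PySem.List.enumerate leads 0) (some (maxsq, maxsqidx)))
      (some (-1, none)) with
    | some (_, idx) => idx
    | none => none)
    =
    (match ((PySem.List.enumerate trails 0).foldl
        (pvStepB ((PySem.List.enumerate Z 0).foldl pvStep1 (none, none, (0 : Int))).1
          ((PySem.List.enumerate Z 0).foldl pvStep1 (none, none, (0 : Int))).2.1
          ((PySem.List.enumerate Z 0).foldl pvStep1 (none, none, (0 : Int))).2.2 Z)
        ((-1 : Int), (none : Option Int))).2 with
      | none => none
      | some i0 =>
        match PySem.List.pyGet? trails i0 with
        | none => none
        | some tb =>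
          pvScan i0 tb.2 ((PySem.List.enumerate trails 0).foldl
            (pvStepB ((PySem.List.enumerate Z 0).foldl pvStep1 (none, none, (0 : Int))).1
              ((PySem.List.enumerate Z 0).foldl pvStep1 (none, none, (0 : Int))).2.1
              ((PySem.List.enumerate Z 0).foldl pvStep1 (none, none, (0 : Int))).2.2 Z)
            ((-1 : Int), (none : Option Int))).1 (PySem.List.enumerate Z 0))
  rw [hOut]
  have hE := pvEnum_cands trails leads 0 (by omega)
  simp only [Nat.cast_zero, List.drop_zero] at hE
  rw [← hZdef] at hE
  rw [← hE]
  -- invariants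
  have hpw : (PySem.List.enumerate Z 0).Pairwise (fun a b => a.1 ≠ b.1) :=
    (PySem.List.pairwise_lt_enumerate Z 0).imp (fun h => ne_of_lt h)
  have hinv0 : pvInv ([] : List (Int × (Bool × Int))) (none, none, (0 : Int)) :=
    ⟨by simp, Or.inl ⟨rfl, rfl, by simp⟩⟩
  have hinv : pvInv (PySem.List.enumerate Z 0)
      ((PySem.List.enumerate Z 0).foldl pvStep1 (none, none, (0 : Int))) := by
    have := pvInv_fold (PySem.List.enumerate Z 0) [] (none, none, (0 : Int)) hinv0 (by simp) hpw
    simpa using this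
  have hrows : ∀ it ∈ PySem.List.enumerate trails 0,
      0 ≤ it.1 ∧ PySem.List.pyGet? trails it.1 = some it.2 := by
    intro it hit
    obtain ⟨k, hk, hk1, hk2⟩ := pvMem_enumerate trails 0 it (by simpa using hit)
    simp only [Nat.cast_zero, zero_add] at hk1
    refine ⟨by omega, ?_⟩
    rw [hk1, PySem.List.pyGet?_natCast]
    exact hk2
  have hinv' : pvInv (PySem.List.enumerate Z 0)
      (((PySem.List.enumerate Z 0).foldl pvStep1 (none, none, (0 : Int))).1,
       ((PySem.List.enumerate Z 0).foldl pvStep1 (none, none, (0 : Int))).2.1,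
       ((PySem.List.enumerate Z 0).foldl pvStep1 (none, none, (0 : Int))).2.2) := hinv
  have hrel := pvStage2_rel trails Z _ _ _ hinv' (PySem.List.enumerate trails 0) hrows
    ((-1 : Int), (none : Option (Int × Int))) ((-1 : Int), (none : Option Int))
    ⟨rfl, Or.inl ⟨rfl, rfl⟩⟩
  exact pvFinal trails Z _ _ hrel

theorem find_best_pair_spec : Claim_equal_find_best_pair := by
  intro leads trails _ hpre
  unfold Spec_find_best_pair
  rcases hpre with h | hm
  · subst h; rfl
  · by_cases ht : trails = []
    · subst ht; rfl
    · exact pvMain leads trails hm ht
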